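-- pv_equiv track=rewrite | github.com/h4cK3rM4n04/P.10Le_tri_par_insertion | one_programmer_un_tri.py | inserer
-- ===== SOURCE A (Python) =====
-- def inserer(T,i) :
--     # YOUR CODE HERE
--     x = [T[x] for x in range(len(T[:i+1]))]
--     for y in range(len(x)):
--         for j in range(len(x)):
--             if x[y] > x[j]:
--                 z = x[y]
--                 x[y] = x[j]
--                 x[j] = z
--     return x[::-1]+T[i+1:]
-- ===== SOURCE B (Python) =====
-- def inserer(T, i):
--     # sort the prefix T[:i+1], keep the tail unchanged; T itself is not mutated
--     return sorted(T[:i+1]) + T[i+1:]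
-- ===== Notes on version B (the rewrite author's own statement) =====
-- stated objective: idiomatic
-- what changed: Replaces A's all-pairs compare-and-swap loops over the prefix followed by a reversal with a single call to the built-in sorted() on the prefix, appending the tail unchanged.
import Mathlib
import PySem

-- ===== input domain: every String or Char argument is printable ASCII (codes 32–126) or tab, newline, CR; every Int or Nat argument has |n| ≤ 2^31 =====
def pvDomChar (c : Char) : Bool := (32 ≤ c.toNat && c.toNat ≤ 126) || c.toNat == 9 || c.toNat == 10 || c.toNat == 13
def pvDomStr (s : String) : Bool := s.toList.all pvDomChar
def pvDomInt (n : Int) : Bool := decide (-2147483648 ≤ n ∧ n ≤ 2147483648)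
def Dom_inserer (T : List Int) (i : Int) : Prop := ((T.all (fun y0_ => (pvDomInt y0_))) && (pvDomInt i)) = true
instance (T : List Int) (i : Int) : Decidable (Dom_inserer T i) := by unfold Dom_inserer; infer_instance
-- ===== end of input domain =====

-- B replaces A's all-pairs swap loops + reversal by sorting the prefix with the library sort (idiomatic; return value only, A does not mutate T).

-- ===== PORT A =====
def inserer (T : List Int) (i : Int) : List Int :=
  -- x = [T[x] for x in range(len(T[:i+1]))]
  let pref := PySem.List.slice T none (some (i+1))
  let x0 := (PySem.List.pyRange 0 pref.length 1).map (fun k => PySem.List.pyGetD T k 0)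
  -- for y in range(len(x)): for j in range(len(x)): if x[y] > x[j]: swap
  let xf := (PySem.List.pyRange 0 x0.length 1).foldl (fun x y =>
      (PySem.List.pyRange 0 x.length 1).foldl (fun x j =>
        if PySem.List.pyGetD x y 0 > PySem.List.pyGetD x j 0 then
          let z := PySem.List.pyGetD x y 0
          let x1 := PySem.List.pySetD x y (PySem.List.pyGetD x j 0)
          PySem.List.pySetD x1 j z
        else x) x) x0
  -- return x[::-1] + T[i+1:]
  ((PySem.List.slice? xf none none (-1)).getD []) ++ PySem.List.slice T (some (i+1)) none

-- ===== PORT B =====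
def inserer_alt (T : List Int) (i : Int) : List Int :=
  -- return sorted(T[:i+1]) + T[i+1:]
  PySem.List.sorted (PySem.List.slice T none (some (i+1))) (fun v => v) false
    ++ PySem.List.slice T (some (i+1)) none

-- ===== PRECONDITION & SPEC =====
def Spec_inserer (T : List Int) (i : Int) (out : List Int) : Prop := out = inserer_alt T i
instance (T : List Int) (i : Int) (out : List Int) : Decidable (Spec_inserer T i out) := by unfold Spec_inserer; infer_instance

-- ===== CLAIM (what is proved, stated in full; the proofs are below) =====
def Claim_equal_inserer : Prop := ∀ (T : List Int) (i : Int), Dom_inserer T i → Spec_inserer T i (inserer T i)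

-- ===== LEMMAS AND PROOFS =====

-- one compare-and-swap step of A's inner loop, on Nat indices
def stepN (y : Nat) (x : List Int) (j : Nat) : List Int :=
  if x.getD y 0 > x.getD j 0 then (x.set y (x.getD j 0)).set j (x.getD y 0) else x

-- one full inner pass of A (j = 0 .. len-1) for a fixed y
def passF (x : List Int) (y : Nat) : List Int := (List.range x.length).foldl (stepN y) x

-- structural model of a pass segment: scan l with carry c; if c > d place c and carry d, else place d
def carryIns (c : Int) : List Int → List Int × Int
  | [] => ([], c)
  | d :: rest =>
    if c > d then
      let p := carryIns d rest
      (c :: p.1, p.2)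
    else
      let p := carryIns c rest
      (d :: p.1, p.2)

theorem carry_len : ∀ (l : List Int) (c : Int), (carryIns c l).1.length = l.length
  | [], _ => rfl
  | d :: rest, c => by
    by_cases h : c > d <;> simp [carryIns, h, carry_len rest]

theorem carry_perm : ∀ (l : List Int) (c : Int),
    ((carryIns c l).1 ++ [(carryIns c l).2]).Perm (c :: l)
  | [], _ => List.Perm.refl _
  | d :: rest, c => by
    by_cases h : c > d
    · simpa [carryIns, h] using (carry_perm rest d).cons c
    · simp only [carryIns, h, if_false]
      exact ((carry_perm rest c).cons d).trans (List.Perm.swap c d rest)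

theorem carry_le : ∀ (l : List Int) (c : Int), (carryIns c l).2 ≤ c
  | [], _ => le_refl _
  | d :: rest, c => by
    by_cases h : c > d
    · simp only [carryIns, h, if_true]
      exact le_trans (carry_le rest d) (le_of_lt h)
    · simp only [carryIns, h, if_false]
      exact carry_le rest c

theorem carry_ge : ∀ (l : List Int) (c : Int), ∀ a ∈ (carryIns c l).1, (carryIns c l).2 ≤ a
  | [], _ => by simp [carryIns]
  | d :: rest, c => by
    by_cases h : c > d <;> simp only [carryIns, h, if_true, if_false] <;>
      intro a ha <;> rcases List.mem_cons.mp ha with rfl | ha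
    · exact le_trans (carry_le rest d) (le_of_lt h)
    · exact carry_ge rest d a ha
    · exact le_trans (carry_le rest c) (not_lt.mp h)
    · exact carry_ge rest c a ha

theorem carry_mem : ∀ (l : List Int) (c : Int), ∀ a ∈ (carryIns c l).1, a = c ∨ a ∈ l
  | [], _ => by simp [carryIns]
  | d :: rest, c => by
    by_cases h : c > d <;> simp only [carryIns, h, if_true, if_false] <;>
      intro a ha <;> rcases List.mem_cons.mp ha with rfl | ha
    · exact Or.inl rfl
    · rcases carry_mem rest d a ha with rfl | h'
      · exact Or.inr (List.mem_cons_self ..)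
      · exact Or.inr (List.mem_cons_of_mem _ h')
    · exact Or.inr (List.mem_cons_self ..)
    · rcases carry_mem rest c a ha with rfl | h'
      · exact Or.inl rfl
      · exact Or.inr (List.mem_cons_of_mem _ h')

theorem carry_sorted : ∀ (l : List Int) (c : Int), l.Pairwise (· ≥ ·) →
    (carryIns c l).1.Pairwise (· ≥ ·)
  | [], _, _ => List.Pairwise.nil
  | d :: rest, c, h => by
    rcases List.pairwise_cons.mp h with ⟨hd, hrest⟩
    by_cases hcd : c > d <;> simp only [carryIns, hcd, if_true, if_false]
    · refine List.pairwise_cons.mpr ⟨?_, carry_sorted rest d hrest⟩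
      intro a ha
      rcases carry_mem rest d a ha with rfl | h'
      · exact le_of_lt hcd
      · exact le_trans (hd a h') (le_of_lt hcd)
    · refine List.pairwise_cons.mpr ⟨?_, carry_sorted rest c hrest⟩
      intro a ha
      rcases carry_mem rest c a ha with rfl | h'
      · exact not_lt.mp hcd
      · exact hd a h'

theorem getD_at_len : ∀ (A : List Int) (B : List Int) (c : Int),
    (A ++ c :: B).getD A.length 0 = c
  | [], _, _ => rfl
  | a :: A, B, c => by simp

theorem set_at_len : ∀ (A : List Int) (B : List Int) (c v : Int),
    (A ++ c :: B).set A.length v = A ++ v :: B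
  | [], _, _, _ => rfl
  | a :: A, B, c, v => by simp [set_at_len A B c v]

theorem getD_mid (A B C : List Int) (b c : Int) :
    (A ++ b :: (B ++ c :: C)).getD (A.length + 1 + B.length) 0 = c := by
  have h1 : A ++ b :: (B ++ c :: C) = (A ++ b :: B) ++ c :: C := by simp
  have h2 : A.length + 1 + B.length = (A ++ b :: B).length := by simp; omega
  rw [h1, h2]
  exact getD_at_len _ _ _

theorem set_mid (A B C : List Int) (b c v : Int) :
    (A ++ b :: (B ++ c :: C)).set (A.length + 1 + B.length) v = A ++ b :: (B ++ v :: C) := by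
  have h1 : A ++ b :: (B ++ c :: C) = (A ++ b :: B) ++ c :: C := by simp
  have h2 : A.length + 1 + B.length = (A ++ b :: B).length := by simp; omega
  rw [h1, h2, set_at_len]
  simp

theorem phase1 : ∀ (rest done : List Int) (c : Int) (s : List Int),
    List.foldl (stepN (done.length + rest.length)) (done ++ (rest ++ c :: s))
      (List.range' done.length rest.length)
    = done ++ ((carryIns c rest).1 ++ (carryIns c rest).2 :: s)
  | [], done, c, s => by simp [carryIns]
  | d :: rest', done, c, s => by
    simp only [List.length_cons]
    rw [List.range'_succ, List.foldl_cons]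
    have hy : done.length + (rest'.length + 1) = done.length + 1 + rest'.length := by omega
    have hstate : done ++ (d :: rest' ++ c :: s) = done ++ d :: (rest' ++ c :: s) := by simp
    rw [hstate, hy]
    have hgy : (done ++ d :: (rest' ++ c :: s)).getD (done.length + 1 + rest'.length) 0 = c :=
      getD_mid done rest' s d c
    have hgj : (done ++ d :: (rest' ++ c :: s)).getD done.length 0 = d := getD_at_len _ _ _
    by_cases h : c > d
    · have hstep : stepN (done.length + 1 + rest'.length) (done ++ d :: (rest' ++ c :: s)) done.length
          = done ++ c :: (rest' ++ d :: s) := by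
        unfold stepN
        rw [hgy, hgj, if_pos h, set_mid done rest' s d c d, set_at_len done (rest' ++ d :: s) d c]
      rw [hstep]
      have hidx : done.length + 1 + rest'.length = (done ++ [c]).length + rest'.length := by simp
      have hstart : done.length + 1 = (done ++ [c]).length := by simp
      rw [hidx, hstart]
      have hIH := phase1 rest' (done ++ [c]) d s
      have hst2 : (done ++ [c]) ++ (rest' ++ d :: s) = done ++ c :: (rest' ++ d :: s) := by simp
      rw [hst2] at hIH
      rw [hIH]
      simp [carryIns, h]
    · have hstep : stepN (done.length + 1 + rest'.length) (done ++ d :: (rest' ++ c :: s)) done.length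
          = done ++ d :: (rest' ++ c :: s) := by
        unfold stepN
        rw [hgy, hgj, if_neg (by omega)]
      rw [hstep]
      have hidx : done.length + 1 + rest'.length = (done ++ [d]).length + rest'.length := by simp
      have hstart : done.length + 1 = (done ++ [d]).length := by simp
      rw [hidx, hstart]
      have hIH := phase1 rest' (done ++ [d]) c s
      have hst2 : (done ++ [d]) ++ (rest' ++ c :: s) = done ++ d :: (rest' ++ c :: s) := by simp
      rw [hst2] at hIH
      rw [hIH]
      simp [carryIns, h]

theorem phase3 : ∀ (rest sdone pre : List Int) (c : Int),
    List.foldl (stepN pre.length) (pre ++ c :: (sdone ++ rest))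
      (List.range' (pre.length + 1 + sdone.length) rest.length)
    = pre ++ (carryIns c rest).2 :: (sdone ++ (carryIns c rest).1)
  | [], sdone, pre, c => by simp [carryIns]
  | e :: rest', sdone, pre, c => by
    simp only [List.length_cons]
    rw [List.range'_succ, List.foldl_cons]
    have hgy : (pre ++ c :: (sdone ++ e :: rest')).getD pre.length 0 = c := getD_at_len _ _ _
    have hgj : (pre ++ c :: (sdone ++ e :: rest')).getD (pre.length + 1 + sdone.length) 0 = e :=
      getD_mid pre sdone rest' c e
    by_cases h : c > e
    · have hstep : stepN pre.length (pre ++ c :: (sdone ++ e :: rest')) (pre.length + 1 + sdone.length)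
          = pre ++ e :: (sdone ++ c :: rest') := by
        unfold stepN
        rw [hgy, hgj, if_pos h, set_at_len pre (sdone ++ e :: rest') c e,
          set_mid pre sdone rest' e e c]
      rw [hstep]
      have hidx : pre.length + 1 + sdone.length + 1 = pre.length + 1 + (sdone ++ [c]).length := by
        simp; omega
      have hst2 : pre ++ e :: (sdone ++ c :: rest') = pre ++ e :: ((sdone ++ [c]) ++ rest') := by simp
      rw [hidx, hst2, phase3 rest' (sdone ++ [c]) pre e]
      simp [carryIns, h]
    · have hstep : stepN pre.length (pre ++ c :: (sdone ++ e :: rest')) (pre.length + 1 + sdone.length)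
          = pre ++ c :: (sdone ++ e :: rest') := by
        unfold stepN
        rw [hgy, hgj, if_neg (by omega)]
      rw [hstep]
      have hidx : pre.length + 1 + sdone.length + 1 = pre.length + 1 + (sdone ++ [e]).length := by
        simp; omega
      have hst2 : pre ++ c :: (sdone ++ e :: rest') = pre ++ c :: ((sdone ++ [e]) ++ rest') := by simp
      rw [hidx, hst2, phase3 rest' (sdone ++ [e]) pre c]
      simp [carryIns, h]

theorem pass_eq (p : List Int) (c : Int) (s : List Int) :
    passF (p ++ c :: s) p.length
    = (carryIns c p).1 ++ (carryIns (carryIns c p).2 s).2 :: (carryIns (carryIns c p).2 s).1 := by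
  unfold passF
  have hlen : (p ++ c :: s).length = p.length + (1 + s.length) := by simp; omega
  rw [hlen, List.range_eq_range']
  have hsplit1 : List.range' 0 (p.length + (1 + s.length))
      = List.range' 0 p.length ++ List.range' p.length (1 + s.length) := by
    simpa using (@List.range'_append 0 p.length (1 + s.length) 1).symm
  have hsplit2 : List.range' p.length (1 + s.length)
      = List.range' p.length 1 ++ List.range' (p.length + 1) s.length := by
    simpa using (@List.range'_append p.length 1 s.length 1).symm
  rw [hsplit1, hsplit2, List.foldl_append, List.foldl_append]
  have h1 := phase1 p [] c s
  simp only [List.nil_append, List.length_nil, Nat.zero_add] at h1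
  rw [h1]
  have hm1len : (carryIns c p).1.length = p.length := carry_len p c
  have hmid : List.foldl (stepN p.length) ((carryIns c p).1 ++ (carryIns c p).2 :: s)
      (List.range' p.length 1) = (carryIns c p).1 ++ (carryIns c p).2 :: s := by
    simp only [List.range'_succ, List.range'_zero, List.foldl_cons, List.foldl_nil]
    unfold stepN
    rw [if_neg (by omega)]
  rw [hmid]
  have h3 := phase3 s [] (carryIns c p).1 (carryIns c p).2
  simp only [List.nil_append, List.length_nil, Nat.add_zero] at h3
  rw [hm1len] at h3
  simpa using h3

theorem outer_run : ∀ (m : Nat) (q s : List Int), s.length = m → q.Pairwise (· ≥ ·) →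
    (List.foldl passF (q ++ s) (List.range' q.length m)).Pairwise (· ≥ ·) ∧
    (List.foldl passF (q ++ s) (List.range' q.length m)).Perm (q ++ s)
  | 0, q, s, hm, hq => by
    have hs : s = [] := List.length_eq_zero_iff.mp hm
    subst hs
    simp only [List.range'_zero, List.foldl_nil, List.append_nil]
    exact ⟨hq, List.Perm.refl _⟩
  | m' + 1, q, s, hm, hq => by
    rcases s with _ | ⟨c, s'⟩
    · simp at hm
    · rw [List.range'_succ, List.foldl_cons, pass_eq q c s']
      have hq2sorted : ((carryIns c q).1 ++ [(carryIns (carryIns c q).2 s').2]).Pairwise (· ≥ ·) := by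
        refine List.pairwise_append.mpr ⟨carry_sorted q c hq, List.pairwise_singleton _ _, ?_⟩
        intro a ha b hb
        rcases List.mem_singleton.mp hb with rfl
        exact le_trans (carry_le s' (carryIns c q).2) (carry_ge q c a ha)
      have hshape : (carryIns c q).1 ++ (carryIns (carryIns c q).2 s').2 :: (carryIns (carryIns c q).2 s').1
          = ((carryIns c q).1 ++ [(carryIns (carryIns c q).2 s').2]) ++ (carryIns (carryIns c q).2 s').1 := by
        simp
      have hlen2 : (carryIns (carryIns c q).2 s').1.length = m' := by
        rw [carry_len]
        simpa using hm
      have hstart : q.length + 1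
          = ((carryIns c q).1 ++ [(carryIns (carryIns c q).2 s').2]).length := by
        simp [carry_len]
      rw [hshape, hstart]
      obtain ⟨hsort, hperm⟩ := outer_run m'
        ((carryIns c q).1 ++ [(carryIns (carryIns c q).2 s').2])
        (carryIns (carryIns c q).2 s').1 hlen2 hq2sorted
      refine ⟨hsort, hperm.trans ?_⟩
      have e1 : ((carryIns c q).1 ++ [(carryIns (carryIns c q).2 s').2])
            ++ (carryIns (carryIns c q).2 s').1
          = (carryIns c q).1 ++ ((carryIns (carryIns c q).2 s').2 :: (carryIns (carryIns c q).2 s').1) := by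
        simp
      rw [e1]
      have p1 : ((carryIns (carryIns c q).2 s').2 :: (carryIns (carryIns c q).2 s').1).Perm
          ((carryIns (carryIns c q).2 s').1 ++ [(carryIns (carryIns c q).2 s').2]) :=
        (List.perm_append_singleton _ _).symm
      have p2 := (p1.trans (carry_perm s' (carryIns c q).2)).append_left (carryIns c q).1
      refine p2.trans ?_
      have e2 : (carryIns c q).1 ++ ((carryIns c q).2 :: s')
          = ((carryIns c q).1 ++ [(carryIns c q).2]) ++ s' := by simp
      rw [e2]
      refine ((carry_perm q c).append_right s').trans ?_
      exact List.perm_middle.symm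

theorem inner_bridge (x : List Int) (k : Nat) :
    (PySem.List.pyRange 0 (x.length : Int) 1).foldl (fun x j =>
        if PySem.List.pyGetD x (k : Int) 0 > PySem.List.pyGetD x j 0 then
          let z := PySem.List.pyGetD x (k : Int) 0
          let x1 := PySem.List.pySetD x (k : Int) (PySem.List.pyGetD x j 0)
          PySem.List.pySetD x1 j z
        else x) x
    = passF x k := by
  have h1 : PySem.List.pyRange 0 (x.length : Int) 1
      = (List.range x.length).map (fun k : Nat => (k : Int)) := by
    rw [PySem.List.pyRange_one]
    simp
  rw [h1, List.foldl_map]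
  have hf : (fun (x' : List Int) (j : Nat) =>
      if PySem.List.pyGetD x' (k : Int) 0 > PySem.List.pyGetD x' ((j : Nat) : Int) 0 then
        let z := PySem.List.pyGetD x' (k : Int) 0
        let x1 := PySem.List.pySetD x' (k : Int) (PySem.List.pyGetD x' ((j : Nat) : Int) 0)
        PySem.List.pySetD x1 ((j : Nat) : Int) z
      else x') = stepN k := by
    funext x' j
    simp [stepN]
  rw [hf]
  rfl

theorem outer_bridge (x0 : List Int) :
    (PySem.List.pyRange 0 (x0.length : Int) 1).foldl (fun x y =>
      (PySem.List.pyRange 0 (x.length : Int) 1).foldl (fun x j =>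
        if PySem.List.pyGetD x y 0 > PySem.List.pyGetD x j 0 then
          let z := PySem.List.pyGetD x y 0
          let x1 := PySem.List.pySetD x y (PySem.List.pyGetD x j 0)
          PySem.List.pySetD x1 j z
        else x) x) x0
    = List.foldl passF x0 (List.range x0.length) := by
  have h1 : PySem.List.pyRange 0 (x0.length : Int) 1
      = (List.range x0.length).map (fun k : Nat => (k : Int)) := by
    rw [PySem.List.pyRange_one]
    simp
  rw [h1, List.foldl_map]
  congr 1
  funext x k
  exact inner_bridge x k

theorem slice_to_prefix (T : List Int) (b : Int) :
    (PySem.List.slice T none (some b)).IsPrefix T := by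
  by_cases hb : 0 ≤ b
  · rw [PySem.List.slice_to T hb]
    exact List.take_prefix _ _
  · have hk : 0 < (-b).toNat := by omega
    have hbe : b = -(((-b).toNat : Nat) : Int) := by omega
    rw [hbe, PySem.List.slice_to_neg_natCast T _ hk]
    exact List.take_prefix _ _

theorem comp_eq (pref r : List Int) :
    (PySem.List.pyRange 0 (pref.length : Int) 1).map (fun k => PySem.List.pyGetD (pref ++ r) k 0)
    = pref := by
  rw [PySem.List.pyRange_one]
  simp only [List.map_map]
  apply List.ext_getElem
  · simp
  · intro n h1 h2
    simp only [List.getElem_map, List.getElem_range, Function.comp_apply, Int.sub_zero,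
      Int.toNat_natCast] at *
    have hc : ((0 : Int) + (n : Int)) = ((n : Nat) : Int) := by omega
    rw [hc, PySem.List.pyGetD_natCast]
    rw [List.getD_append _ _ _ _ (by omega)]
    exact List.getD_eq_getElem _ _ (by omega)

theorem comp_eq' (T pref : List Int) (hpre : pref.IsPrefix T) :
    (PySem.List.pyRange 0 (pref.length : Int) 1).map (fun k => PySem.List.pyGetD T k 0)
    = pref := by
  obtain ⟨r, rfl⟩ := hpre
  exact comp_eq pref r

-- ===== VERDICT (by name: the statement is the Claim_ definition above) =====
theorem inserer_spec : Claim_equal_inserer := by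
  intro T i _
  unfold Spec_inserer inserer inserer_alt
  dsimp only
  rw [comp_eq' T _ (slice_to_prefix T (i + 1)), outer_bridge, List.range_eq_range']
  obtain ⟨hsort, hperm⟩ := outer_run (PySem.List.slice T none (some (i + 1))).length []
    (PySem.List.slice T none (some (i + 1))) rfl List.Pairwise.nil
  simp only [List.nil_append, List.length_nil] at hsort hperm
  rw [PySem.List.slice?_none_none_neg_one]
  simp only [Option.getD_some]
  have hfinal := PySem.List.sorted_id_eq_of_perm_of_pairwise
    (PySem.List.slice T none (some (i + 1)))
    ((List.foldl passF (PySem.List.slice T none (some (i + 1)))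
      (List.range' 0 (PySem.List.slice T none (some (i + 1))).length)).reverse)
    ((List.reverse_perm _).trans hperm)
    (by rw [List.pairwise_reverse]; exact hsort.imp fun h => h)
  rw [hfinal]
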